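-- pv_equiv track=rewrite | github.com/Jensen6842/SOF1 | SOF1-Summative]/ClosedExamination/ClosedExamination/question_4.py | check_level
-- ===== SOURCE A (Python) =====
-- def check_level(level):
--     # If the level ends with a mine, it isn't feasible.
--     if level[-1] == 0:
--         return False
--     for i in range(len(level)):
--         try:
--             # If the level is only 1 long, it is feasible if it isn't a 0.
--             if len(level) == 1:
--                 if level[i] == 0:
--                     return False
--                 else:
--                     return True
--                 # If the level starts with a mine it isn't feasible.
--             if level[i] == 0:
--                 return False
--             # If the spring's max takes you to a mine, try one less than that.
--             elif level[i+level[i]] == 0: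
--                 if level[i] == 1:
--                     return False
--                 else:
--                     new_level = level
--                     new_level[i] = new_level[i]-1
--                     new_level = new_level[i:]
--                     if check_level(new_level) is True:
--                         return True
--                     else:
--                         return False
--             # If a springs max doesn't take you to a mine, continue.
--             else:
--                 new_level = level[i+level[i]:]
--                 if check_level(new_level) is True:
--                         return True
--                 else:
--                     return False
--         # If a spring can jump past the end, it is feasible.
--         except IndexError:
--             return True
-- ===== SOURCE B (Python) =====
-- def check_level(level):
--     n = len(level)
--     if level[-1] == 0:
--         return False
--     # nearest-nonzero-at-or-before index table: pz[j] = largest k <= j with level[k] != 0, else -1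
--     pz = [0] * n
--     prev = -1
--     for j in range(n):
--         if level[j] != 0:
--             prev = j
--         pz[j] = prev
--     p = 0
--     while True:
--         v = level[p]
--         if v <= 0:
--             return False
--         if p + v >= n:
--             return True
--         q = pz[p + v]
--         if q <= p:
--             return False
--         p = q
-- ===== Notes on version B (the rewrite author's own statement) =====
-- stated objective: alternative
-- what changed: A's slice-copying greedy backtracking recursion (each step copies a suffix and retries the jump one shorter on a mine) is replaced by a one-pass iterative simulation over a precomputed nearest-nonzero-at-or-before index array, so each position is resolved by one table lookup instead of a decrement-and-recurse cascade over copied lists.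
-- outside the precondition, e.g. on check_level([-2]): A returns True, B returns False; on check_level([-1, 1, -2, -2]): A returns True, B returns False; on check_level([-2, 0, 3]): A raises RecursionError, B returns False
import Mathlib
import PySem

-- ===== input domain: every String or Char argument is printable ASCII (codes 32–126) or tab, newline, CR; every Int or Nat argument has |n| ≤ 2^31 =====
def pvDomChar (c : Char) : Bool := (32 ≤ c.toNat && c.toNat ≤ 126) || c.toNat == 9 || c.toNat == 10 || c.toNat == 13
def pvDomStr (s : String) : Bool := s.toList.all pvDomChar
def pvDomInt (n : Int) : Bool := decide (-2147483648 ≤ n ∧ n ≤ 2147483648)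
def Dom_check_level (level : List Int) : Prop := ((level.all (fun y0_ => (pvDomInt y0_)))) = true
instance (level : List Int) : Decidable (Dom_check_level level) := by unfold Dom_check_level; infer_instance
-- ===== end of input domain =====

-- B replaces A's slice-copying greedy backtracking recursion by a one-pass iterative simulation over a
-- precomputed nearest-nonzero-at-or-before index array (objective: alternative algorithm; no speed claim).
-- Note: A may mutate its argument in place (it decrements level[0] in one branch); the equivalence proved
-- here is about the RETURN value only.

-- ===== PORT A =====
-- fuel: A's recursion strictly decreases length+sum-of-nonnegative-entries; this bound makes the port total.
def fuelA (level : List Int) : Nat := level.length + (level.map Int.toNat).sum + 1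

def checkAuxA : Nat → List Int → Bool
  | 0, _ => false
  | f + 1, level =>
    match PySem.List.pyGet? level (-1) with      -- level[-1]; none = IndexError (empty list, outside Pre_)
    | none => false
    | some lastv =>
      if lastv == 0 then false
      else
        match level with
        | [] => false                            -- unreachable: pyGet? succeeded
        | hd :: tl =>
          -- the for-loop body always returns, so only i = 0 runs
          if (hd :: tl).length == 1 then (if hd == 0 then false else true)
          else if hd == 0 then false
          else
            match PySem.List.pyGet? (hd :: tl) (0 + hd) with   -- level[i+level[i]]
            | none => true                                      -- except IndexError: return True
            | some v =>
              if v == 0 then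
                if hd == 1 then false
                else checkAuxA f (PySem.List.slice ((hd - 1) :: tl) (some 0) none)  -- mutate, then level[0:]
              else checkAuxA f (PySem.List.slice (hd :: tl) (some (0 + hd)) none)   -- level[i+level[i]:]

def check_level (level : List Int) : Bool := checkAuxA (fuelA level) level

-- ===== PORT B =====
def pzAux : List Int → Int → Int → List Int
  | [], _, _ => []
  | x :: r, j, prev =>
    let p' := if x == 0 then prev else j
    p' :: pzAux r (j + 1) p'

def altLoop (level pz : List Int) (n : Int) : Nat → Nat → Bool
  | 0, _ => false                                -- fuel exhaustion, unreachable from check_level_alt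
  | f + 1, p =>
    let v := level.getD p 0
    if v ≤ 0 then false
    else if n ≤ (p : Int) + v then true
    else
      match PySem.List.pyGet? pz ((p : Int) + v) with   -- pz[p + v]; none = IndexError (outside Pre_)
      | none => false
      | some q =>
        if q ≤ (p : Int) then false
        else altLoop level pz n f q.toNat

def check_level_alt (level : List Int) : Bool :=
  match PySem.List.pyGet? level (-1) with
  | none => false
  | some lastv =>
    if lastv == 0 then false
    else altLoop level (pzAux level 0 (-1)) level.length level.length 0

-- ===== PRECONDITION & SPEC =====
-- Pre_ excludes the empty list (A raises IndexError) and lists with a negative entry (unless A rejects the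
-- level before reading any jump: it ends or starts with a mine): negative jump values are outside the task's
-- natural domain and A there either recurses forever (RecursionError) or returns a value only via Python's
-- negative-index wraparound, an artefact of its implementation.
def Pre_check_level (level : List Int) : Prop :=
  level ≠ [] ∧ (level.getLast? = some 0 ∨ level.getD 0 0 = 0 ∨ ∀ x ∈ level, 0 ≤ x)
instance (level : List Int) : Decidable (Pre_check_level level) := by unfold Pre_check_level; infer_instance
def pvWitness_check_level : List Int := [2, 0, 1]

def Spec_check_level (level : List Int) (out : Bool) : Prop := out = check_level_alt level
instance (level : List Int) (out : Bool) : Decidable (Spec_check_level level out) := by unfold Spec_check_level; infer_instance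

-- ===== CLAIM (what is proved, stated in full; the proofs are below) =====
def Claim_equal_check_level : Prop := ∀ (level : List Int), Dom_check_level level → Pre_check_level level → Spec_check_level level (check_level level)

-- ===== LEMMAS AND PROOFS =====

-- proof-side greedy spec: position p in the fixed list, current (possibly decremented) jump budget d
def G (level : List Int) (p : Nat) (d : Int) : Bool :=
  if h1 : d < 0 then false
  else if h2 : level.length ≤ p + 1 then (if d = 0 then false else true)
  else if h3 : d = 0 then false
  else if h4 : level.length ≤ p + d.toNat then true
  else if h5 : level.getD (p + d.toNat) 0 = 0 then
    if h6 : d = 1 then false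
    else G level p (d - 1)
  else G level (p + d.toNat) (level.getD (p + d.toNat) 0)
termination_by (level.length - p, d.toNat)
decreasing_by
  · apply Prod.Lex.right; omega
  · apply Prod.Lex.left; omega

theorem sum_toNat_drop_le (l : List Int) (k : Nat) :
    (((l.drop k).map Int.toNat).sum) ≤ ((l.map Int.toNat).sum) := by
  calc ((l.drop k).map Int.toNat).sum
      ≤ ((l.take k).map Int.toNat).sum + ((l.drop k).map Int.toNat).sum := by omega
    _ = (l.map Int.toNat).sum := by
      rw [← List.sum_append, ← List.map_append, List.take_append_drop]

theorem getLast?_drop_eq (l : List Int) : ∀ (k : Nat), k < l.length → (l.drop k).getLast? = l.getLast? := by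
  induction l with
  | nil => intro k h; simp at h
  | cons x xs ih =>
    intro k h
    match k with
    | 0 => rfl
    | k + 1 =>
      rw [List.drop_succ_cons, ih k (by simpa using h)]
      match xs, h with
      | y :: ys, _ => rw [List.getLast?_cons_cons]

-- A-side: the fueled port on the state (p, d) equals G
theorem LA (level : List Int) (lastv : Int) (hlast : level.getLast? = some lastv) (hl0 : ¬ lastv = 0)
    (hnn : ∀ x ∈ level, 0 ≤ x) :
    ∀ (f : Nat) (p : Nat) (d : Int), 0 ≤ d → p < level.length →
      (level.length - p) + d.toNat + (((level.drop (p + 1)).map Int.toNat).sum) ≤ f →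
      checkAuxA f (d :: level.drop (p + 1)) = G level p d := by
  intro f
  induction f with
  | zero => intro p d hd hp hb; omega
  | succ f ih =>
    intro p d hd hp hb
    simp only [checkAuxA]
    by_cases hp1 : level.length ≤ p + 1
    · have hdrop : level.drop (p + 1) = [] := List.drop_eq_nil_of_le hp1
      rw [hdrop, PySem.List.pyGet?_neg_one]
      have hG : G level p d = (if d = 0 then false else true) := by
        rw [G, dif_neg (by omega : ¬ d < 0), dif_pos hp1]
      rw [hG]
      simp only [List.getLast?_singleton, List.length_singleton]
      by_cases hd0 : d = 0 <;> simp [hd0]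
    · have hne : level.drop (p + 1) ≠ [] := by
        intro he
        have := congrArg List.length he
        simp [List.length_drop] at this
        omega
      have hlast2 : (d :: level.drop (p + 1)).getLast? = some lastv := by
        match hdr : level.drop (p + 1), hne with
        | y :: ys, _ =>
          rw [List.getLast?_cons_cons, ← hdr, getLast?_drop_eq level (p + 1) (by omega), hlast]
      simp only [PySem.List.pyGet?_neg_one, hlast2]
      rw [if_neg (by simpa using hl0)]
      have hlen1 : ¬ ((d :: level.drop (p + 1)).length == 1) = true := by
        simp [List.length_drop]
        omega
      rw [if_neg hlen1]
      by_cases hd0 : d = 0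
      · rw [if_pos (by simpa using hd0)]
        rw [G, dif_neg (by omega : ¬ d < 0), dif_neg hp1, dif_pos hd0]
      · rw [if_neg (by simpa using hd0)]
        have h0d : (0 : Int) + d = ((d.toNat : Nat) : Int) := by omega
        rw [h0d, PySem.List.pyGet?_natCast]
        by_cases hbig : level.length ≤ p + d.toNat
        · have hnone : (d :: level.drop (p + 1))[d.toNat]? = none := by
            rw [List.getElem?_eq_none]
            simp [List.length_drop]
            omega
          simp only [hnone]
          rw [G, dif_neg (by omega : ¬ d < 0), dif_neg hp1, dif_neg hd0, dif_pos hbig]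
        · have hidx : (d :: level.drop (p + 1))[d.toNat]? = some (level.getD (p + d.toNat) 0) := by
            conv_lhs => rw [show d.toNat = (d.toNat - 1) + 1 by omega]
            rw [List.getElem?_cons_succ, List.getElem?_drop]
            rw [show p + 1 + (d.toNat - 1) = p + d.toNat by omega]
            rw [List.getD_eq_getElem level 0 (show p + d.toNat < level.length by omega),
              List.getElem?_eq_getElem (show p + d.toNat < level.length by omega)]
          simp only [hidx]
          by_cases hland : level.getD (p + d.toNat) 0 = 0
          · rw [if_pos (by simpa using hland)]
            by_cases hd1 : d = 1
            · rw [if_pos (by simpa using hd1)]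
              rw [G, dif_neg (by omega : ¬ d < 0), dif_neg hp1, dif_neg hd0, dif_neg hbig,
                dif_pos hland, dif_pos hd1]
            · rw [if_neg (by simpa using hd1)]
              have hGr : G level p d = G level p (d - 1) := by
                rw [G, dif_neg (by omega : ¬ d < 0), dif_neg hp1, dif_neg hd0, dif_neg hbig,
                  dif_pos hland, dif_neg hd1]
              rw [hGr]
              rw [PySem.List.slice_zero_start, PySem.List.slice_none_none]
              exact ih p (d - 1) (by omega) hp (by omega)
          · rw [if_neg (by simpa using hland)]
            rw [PySem.List.slice_from_natCast]
            have hdd : (d :: level.drop (p + 1)).drop d.toNat = level.drop (p + d.toNat) := by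
              conv_lhs => rw [(by omega : d.toNat = (d.toNat - 1) + 1)]
              rw [List.drop_succ_cons, List.drop_drop]
              congr 1
              omega
            rw [hdd]
            have hp' : p + d.toNat < level.length := by omega
            have hcons : level.drop (p + d.toNat)
                = level[p + d.toNat] :: level.drop (p + d.toNat + 1) :=
              List.drop_eq_getElem_cons hp'
            have hgd : level.getD (p + d.toNat) 0 = level[p + d.toNat] :=
              List.getD_eq_getElem level 0 hp'
            have e1 : (level[p + d.toNat]).toNat
                + ((level.drop (p + d.toNat + 1)).map Int.toNat).sum
                = ((level.drop (p + d.toNat)).map Int.toNat).sum := by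
              rw [hcons]
              simp only [List.map_cons, List.sum_cons, List.map_drop]
            have e2 : ((level.drop (p + d.toNat)).map Int.toNat).sum
                ≤ ((level.drop (p + 1)).map Int.toNat).sum := by
              have h3 : level.drop (p + d.toNat) = (level.drop (p + 1)).drop (d.toNat - 1) := by
                rw [List.drop_drop]
                congr 1
                omega
              rw [h3]
              exact sum_toNat_drop_le _ _
            have hGr : G level p d = G level (p + d.toNat) (level.getD (p + d.toNat) 0) := by
              rw [G, dif_neg (by omega : ¬ d < 0), dif_neg hp1, dif_neg hd0, dif_neg hbig,
                dif_neg hland]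
            rw [hGr, hcons, hgd]
            exact ih (p + d.toNat) level[p + d.toNat]
              (hnn _ (List.getElem_mem hp')) hp' (by omega)

-- pz characterisation
theorem pz_le (l : List Int) : ∀ (j prev : Int) (k : Nat), prev < j → k < l.length →
    (pzAux l j prev).getD k 0 ≤ j + k := by
  induction l with
  | nil => intro j prev k h hk; simp at hk
  | cons x r ih =>
    intro j prev k h hk
    by_cases hx : x == 0
    · simp only [pzAux, hx, if_true]
      match k with
      | 0 => simp only [List.getD_cons_zero]; omega
      | k + 1 =>
        simp only [List.getD_cons_succ]
        have := ih (j + 1) prev k (by omega) (by simpa using hk)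
        omega
    · simp only [pzAux, hx, if_false, Bool.false_eq_true]
      match k with
      | 0 => simp only [List.getD_cons_zero]; omega
      | k + 1 =>
        simp only [List.getD_cons_succ]
        have := ih (j + 1) j k (by omega) (by simpa using hk)
        omega

theorem pz_ge (l : List Int) : ∀ (j prev : Int) (k : Nat), prev < j → k < l.length →
    prev ≤ (pzAux l j prev).getD k 0 := by
  induction l with
  | nil => intro j prev k h hk; simp at hk
  | cons x r ih =>
    intro j prev k h hk
    by_cases hx : x == 0
    · simp only [pzAux, hx, if_true]
      match k with
      | 0 => simp only [List.getD_cons_zero]; omega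
      | k + 1 =>
        simp only [List.getD_cons_succ]
        have := ih (j + 1) prev k (by omega) (by simpa using hk)
        omega
    · simp only [pzAux, hx, if_false, Bool.false_eq_true]
      match k with
      | 0 => simp only [List.getD_cons_zero]; omega
      | k + 1 =>
        simp only [List.getD_cons_succ]
        have := ih (j + 1) j k (by omega) (by simpa using hk)
        omega

theorem pz_val (l : List Int) : ∀ (j prev : Int) (k : Nat), k < l.length →
    (pzAux l j prev).getD k 0 = prev ∨
      (j ≤ (pzAux l j prev).getD k 0 ∧
        ¬ l.getD ((pzAux l j prev).getD k 0 - j).toNat 0 = 0) := by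
  induction l with
  | nil => intro j prev k hk; simp at hk
  | cons x r ih =>
    intro j prev k hk
    by_cases hx : x == 0
    · simp only [pzAux, hx, if_true]
      match k with
      | 0 => left; simp
      | k + 1 =>
        simp only [List.getD_cons_succ]
        rcases ih (j + 1) prev k (by simpa using hk) with h | ⟨h1, h2⟩
        · left; exact h
        · right
          refine ⟨by omega, ?_⟩
          have heq : ((pzAux r (j + 1) prev).getD k 0 - j).toNat
               = ((pzAux r (j + 1) prev).getD k 0 - (j + 1)).toNat + 1 := by omega
          rw [heq, List.getD_cons_succ]
          exact h2
    · simp only [pzAux, hx, if_false, Bool.false_eq_true]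
      match k with
      | 0 =>
        simp only [List.getD_cons_zero]
        right
        refine ⟨le_refl _, ?_⟩
        simp only [sub_self, Int.toNat_zero, List.getD_cons_zero]
        simpa using hx
      | k + 1 =>
        simp only [List.getD_cons_succ]
        rcases ih (j + 1) j k (by simpa using hk) with h | ⟨h1, h2⟩
        · rw [h]
          right
          refine ⟨le_refl _, ?_⟩
          simp only [sub_self, Int.toNat_zero, List.getD_cons_zero]
          simpa using hx
        · right
          refine ⟨by omega, ?_⟩
          have heq : ((pzAux r (j + 1) j).getD k 0 - j).toNat
               = ((pzAux r (j + 1) j).getD k 0 - (j + 1)).toNat + 1 := by omega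
          rw [heq, List.getD_cons_succ]
          exact h2

theorem pz_zeros (l : List Int) : ∀ (j prev : Int) (k : Nat), prev < j → k < l.length →
    ∀ i : Nat, i ≤ k → (pzAux l j prev).getD k 0 < j + i → l.getD i 0 = 0 := by
  induction l with
  | nil => intro j prev k h hk; simp at hk
  | cons x r ih =>
    intro j prev k h hk i hi hlt
    by_cases hx : x == 0
    · simp only [pzAux, hx, if_true] at hlt ⊢
      match k, i with
      | 0, 0 => simpa using hx
      | k + 1, 0 => simp only [List.getD_cons_zero]; simpa using hx
      | k + 1, i + 1 =>
        simp only [List.getD_cons_succ] at hlt ⊢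
        exact ih (j + 1) prev k (by omega) (by simpa using hk) i (by omega) (by omega)
    · simp only [pzAux, hx, if_false, Bool.false_eq_true] at hlt ⊢
      match k, i with
      | 0, 0 => simp only [List.getD_cons_zero] at hlt; omega
      | k + 1, 0 =>
        have hge := pz_ge r (j + 1) j k (by omega) (by simpa using hk)
        simp only [List.getD_cons_succ] at hlt
        omega
      | k + 1, i + 1 =>
        simp only [List.getD_cons_succ] at hlt ⊢
        exact ih (j + 1) j k (by omega) (by simpa using hk) i (by omega) (by omega)

-- G cascade: all landings in (p, p+d] are mines → false
theorem GC1 (level : List Int) : ∀ (k : Nat) (d : Int), d.toNat = k → 1 ≤ d →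
    ∀ p : Nat, p + d.toNat < level.length →
    (∀ i : Nat, p < i → i ≤ p + d.toNat → level.getD i 0 = 0) →
    G level p d = false := by
  intro k
  induction k with
  | zero => intro d hdk hd; omega
  | succ k ih =>
    intro d hdk hd p hlen hz
    rw [G]
    rw [dif_neg (by omega : ¬ d < 0), dif_neg (by omega : ¬ level.length ≤ p + 1),
      dif_neg (by omega : ¬ d = 0), dif_neg (by omega : ¬ level.length ≤ p + d.toNat),
      dif_pos (hz (p + d.toNat) (by omega) (by omega))]
    by_cases h6 : d = 1
    · rw [dif_pos h6]
    · rw [dif_neg h6]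
      exact ih (d - 1) (by omega) (by omega) p (by omega)
        (fun i h1 h2 => hz i h1 (by omega))

-- G cascade: q' is the largest non-mine landing in (p, p+d] → G jumps there
theorem GC2 (level : List Int) : ∀ (k : Nat) (d : Int), d.toNat = k → 1 ≤ d →
    ∀ p q' : Nat, p + d.toNat < level.length → p < q' → q' ≤ p + d.toNat →
    ¬ level.getD q' 0 = 0 →
    (∀ i : Nat, q' < i → i ≤ p + d.toNat → level.getD i 0 = 0) →
    G level p d = G level q' (level.getD q' 0) := by
  intro k
  induction k with
  | zero => intro d hdk hd; omega
  | succ k ih =>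
    intro d hdk hd p q' hlen hpq hqd hq hz
    rw [G]
    rw [dif_neg (by omega : ¬ d < 0), dif_neg (by omega : ¬ level.length ≤ p + 1),
      dif_neg (by omega : ¬ d = 0), dif_neg (by omega : ¬ level.length ≤ p + d.toNat)]
    by_cases h5 : level.getD (p + d.toNat) 0 = 0
    · rw [dif_pos h5]
      have hne : ¬ q' = p + d.toNat := fun h => hq (h ▸ h5)
      have h6 : ¬ d = 1 := by
        intro h; subst h; omega
      rw [dif_neg h6]
      exact ih (d - 1) (by omega) (by omega) p q' (by omega) hpq (by omega) hq
        (fun i h1 h2 => hz i h1 (by omega))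
    · rw [dif_neg h5]
      have : q' = p + d.toNat := by
        by_contra hne
        exact h5 (hz (p + d.toNat) (by omega) (by omega))
      rw [this]

theorem pzAux_length (l : List Int) : ∀ (j prev : Int), (pzAux l j prev).length = l.length := by
  induction l with
  | nil => intro j prev; rfl
  | cons x r ih => intro j prev; simp [pzAux, ih]

-- B-side: the loop equals G
theorem LB (level : List Int) (lastv : Int) (hlast : level.getLast? = some lastv) (hl0 : ¬ lastv = 0)
    (hnn : ∀ x ∈ level, 0 ≤ x) :
    ∀ (f : Nat) (p : Nat), p < level.length → level.length - p ≤ f →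
      altLoop level (pzAux level 0 (-1)) level.length f p = G level p (level.getD p 0) := by
  intro f
  induction f with
  | zero => intro p hp hf; omega
  | succ f ih =>
    intro p hp hf
    have hv0 : 0 ≤ level.getD p 0 := by
      rw [List.getD_eq_getElem level 0 hp]
      exact hnn _ (level.getElem_mem hp)
    simp only [altLoop]
    by_cases hv : level.getD p 0 ≤ 0
    · rw [if_pos hv]
      have hv' : level.getD p 0 = 0 := by omega
      rw [G]
      split_ifs <;> simp_all
    · rw [if_neg hv]
      by_cases hge : (level.length : Int) ≤ (p : Int) + level.getD p 0
      · rw [if_pos hge, G]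
        rw [dif_neg (by omega)]
        by_cases h2 : level.length ≤ p + 1
        · rw [dif_pos h2, if_neg (show ¬ level.getD p 0 = 0 by omega)]
        · rw [dif_neg h2, dif_neg (show ¬ level.getD p 0 = 0 by omega), dif_pos (by omega)]
      · rw [if_neg hge]
        have hm : ((p : Int) + level.getD p 0).toNat = p + (level.getD p 0).toNat := by omega
        set m : Nat := p + (level.getD p 0).toNat with hmdef
        have hmn : m < level.length := by omega
        have hpm : p < m := by omega
        have hget : PySem.List.pyGet? (pzAux level 0 (-1)) ((p : Int) + level.getD p 0)
            = some ((pzAux level 0 (-1)).getD m 0) := by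
          rw [PySem.List.pyGet?_of_nonneg _ (show (0:Int) ≤ (p : Int) + level.getD p 0 by omega), hm,
            List.getElem?_eq_getElem (by rw [pzAux_length]; omega),
            List.getD_eq_getElem _ 0 (by rw [pzAux_length]; omega)]
        simp only [hget]
        set q : Int := (pzAux level 0 (-1)).getD m 0 with hqdef
        have hqle : q ≤ m := by
          have := pz_le level 0 (-1) m (by omega) hmn; omega
        have hqge : (-1 : Int) ≤ q := pz_ge level 0 (-1) m (by omega) hmn
        have hzeros : ∀ i : Nat, i ≤ m → q < i → level.getD i 0 = 0 := by
          intro i h1 h2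
          exact pz_zeros level 0 (-1) m (by omega) hmn i h1 (by omega)
        by_cases hqp : q ≤ (p : Int)
        · rw [if_pos hqp]
          exact (GC1 level (level.getD p 0).toNat _ rfl (by omega) p (by omega)
            (fun i h1 h2 => hzeros i h2 (by omega))).symm
        · rw [if_neg hqp]
          have hq0 : 0 ≤ q := by omega
          have hqv : ¬ level.getD q.toNat 0 = 0 := by
            rcases pz_val level 0 (-1) m hmn with h | ⟨_, h⟩
            · omega
            · simpa using h
          have hstep : G level p (level.getD p 0) = G level q.toNat (level.getD q.toNat 0) := by
            exact GC2 level (level.getD p 0).toNat _ rfl (by omega) p q.toNat (by omega)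
              (by omega) (by omega) hqv (fun i h1 h2 => hzeros i h2 (by omega))
          rw [hstep]
          exact ih q.toNat (by omega) (by omega)

-- ===== VERDICT (by name: the statement is the Claim_ definition above) =====
theorem check_level_spec : Claim_equal_check_level := by
  intro level _hdom hpre
  unfold Spec_check_level
  obtain ⟨hne, hdisj⟩ := hpre
  obtain ⟨lastv, hlast⟩ : ∃ v, level.getLast? = some v := by
    cases h : level.getLast? with
    | none => exact absurd (List.getLast?_eq_none_iff.mp h) hne
    | some v => exact ⟨v, rfl⟩
  obtain ⟨x, rest, rfl⟩ : ∃ x rest, level = x :: rest := by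
    cases level with
    | nil => exact absurd rfl hne
    | cons a l => exact ⟨a, l, rfl⟩
  unfold check_level check_level_alt
  by_cases hl0 : lastv = 0
  · simp only [fuelA, checkAuxA, PySem.List.pyGet?_neg_one, hlast]
    rw [if_pos (by simp [hl0]), if_pos (by simp [hl0])]
  · rcases hdisj with h | h | hnn
    · rw [hlast] at h
      simp only [Option.some.injEq] at h
      exact absurd h hl0
    · -- the level starts with a mine: both sides reject it at once
      simp only [List.getD_cons_zero] at h
      subst h
      have hrne : rest ≠ [] := by
        intro he
        subst he
        simp only [List.getLast?_singleton, Option.some.injEq] at hlast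
        exact hl0 (by omega)
      have hrl : rest.length ≠ 0 := fun h0 => hrne (List.eq_nil_of_length_eq_zero h0)
      simp only [fuelA, checkAuxA, PySem.List.pyGet?_neg_one, hlast]
      rw [if_neg (by simpa using hl0)]
      simp [altLoop]
    · have hA : checkAuxA (fuelA (x :: rest)) (x :: rest) = G (x :: rest) 0 x := by
        have hb : (x :: rest).length - 0 + x.toNat
            + (((x :: rest).drop (0 + 1)).map Int.toNat).sum ≤ fuelA (x :: rest) := by
          simp [fuelA]
          omega
        have := LA (x :: rest) lastv hlast hl0 hnn (fuelA (x :: rest)) 0 x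
          (hnn x (by simp)) (by simp) hb
        simpa using this
      have hB := LB (x :: rest) lastv hlast hl0 hnn (x :: rest).length 0 (by simp) (by omega)
      simp only [PySem.List.pyGet?_neg_one, hlast]
      rw [if_neg (by simpa using hl0)]
      rw [hA, hB]
      simp
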